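-- pv_equiv track=rewrite | github.com/dqk0902/DSA_2025 | week3/even.py | count_sublists
-- ===== SOURCE A (Python) =====
-- def count_sublists(numbers):
--     n = len(numbers)
--     count = 0
--     current_run = 0
--
--     for num in numbers:
--         if num % 2 == 0:
--             current_run += 1
--             count += current_run
--         else:
--             current_run = 0
--
--     return count
-- ===== SOURCE B (Python) =====
-- def count_sublists(numbers):
--     # Divide and conquer: split the list in half; an all-even sublist lies
--     # inside one half or spans the midpoint, and the spanning ones number
--     # (even suffix length of left) * (even prefix length of right).
--     n = len(numbers)
--     if n == 0:
--         return 0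
--     if n == 1:
--         return 1 if numbers[0] % 2 == 0 else 0
--     mid = n // 2
--     left = numbers[:mid]
--     right = numbers[mid:]
--     a = 0
--     for x in reversed(left):
--         if x % 2 != 0:
--             break
--         a += 1
--     b = 0
--     for x in right:
--         if x % 2 != 0:
--             break
--         b += 1
--     return count_sublists(left) + count_sublists(right) + a * b
-- ===== Notes on version B (the rewrite author's own statement) =====
-- stated objective: alternative
-- what changed: B counts all-even sublists by divide and conquer: recurse on the two halves and add the midpoint-spanning count as even-suffix-of-left times even-prefix-of-right, instead of A's single left-to-right pass with a running counter.
import Mathlib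
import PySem

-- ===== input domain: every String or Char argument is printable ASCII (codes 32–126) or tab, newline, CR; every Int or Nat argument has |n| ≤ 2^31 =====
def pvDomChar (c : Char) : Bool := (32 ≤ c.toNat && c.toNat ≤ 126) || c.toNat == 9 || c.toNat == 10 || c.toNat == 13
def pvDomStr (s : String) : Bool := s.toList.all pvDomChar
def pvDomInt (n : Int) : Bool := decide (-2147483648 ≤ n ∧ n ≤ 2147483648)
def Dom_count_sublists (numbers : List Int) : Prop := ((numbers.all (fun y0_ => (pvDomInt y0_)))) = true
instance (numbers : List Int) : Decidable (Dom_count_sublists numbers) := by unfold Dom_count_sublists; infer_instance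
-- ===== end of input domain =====

-- B replaces A's single-pass running counter by divide and conquer over the two halves.

-- ===== PORT A =====
-- A: fold over numbers keeping (count, current_run); on even, run += 1 and count += run.
def count_sublists (numbers : List Int) : Int :=
  (numbers.foldl
    (fun (st : Int × Int) num =>
      if PySem.Int.mod num 2 = 0 then (st.1 + (st.2 + 1), st.2 + 1)
      else (st.1, 0))
    (0, 0)).1

-- ===== PORT B =====
-- B's two inner loops share one shape: 'for x in <seq>: if x % 2 != 0: break; acc += 1'
def pvInner : List Int → Int → Int
  | [], acc => acc
  | x :: xs, acc => if PySem.Int.mod x 2 = 0 then pvInner xs (acc + 1) else acc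

-- B: n == 0 -> 0; n == 1 -> numbers[0] % 2 == 0; else halves + (even suffix of left) * (even prefix of right).
-- The Nat fuel (= initial length) only makes the halving recursion structural; it is never exhausted.
def pvDC : Nat → List Int → Int
  | 0, _ => 0
  | fuel+1, numbers =>
    if numbers.length = 0 then 0
    else if numbers.length = 1 then
      (if PySem.Int.mod (PySem.List.pyGetD numbers 0 0) 2 = 0 then 1 else 0)
    else
      let mid := PySem.Int.floordiv (numbers.length : Int) 2
      let left := PySem.List.slice numbers none (some mid)
      let right := PySem.List.slice numbers (some mid) none
      let a := pvInner left.reverse 0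
      let b := pvInner right 0
      pvDC fuel left + pvDC fuel right + a * b

def count_sublists_alt (numbers : List Int) : Int := pvDC numbers.length numbers

-- ===== PRECONDITION & SPEC =====
def Spec_count_sublists (numbers : List Int) (out : Int) : Prop := out = count_sublists_alt numbers
instance (numbers : List Int) (out : Int) : Decidable (Spec_count_sublists numbers out) := by unfold Spec_count_sublists; infer_instance

-- ===== CLAIM =====
def Claim_equal_count_sublists : Prop := ∀ (numbers : List Int), Dom_count_sublists numbers → Spec_count_sublists numbers (count_sublists numbers)

-- ===== LEMMAS AND PROOFS =====

theorem pv_floordiv_two_cast (n : Nat) : PySem.Int.floordiv (n : Int) 2 = ((n / 2 : Nat) : Int) := by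
  rw [PySem.Int.floordiv_eq_ediv_of_pos (by omega : (0:Int) < 2)]
  omega

-- even-prefix length, even-suffix length, all-even test, sum of even-prefix lengths over all suffixes
def pvEP (l : List Int) : Int := pvInner l 0
def pvES (l : List Int) : Int := pvInner l.reverse 0
def pvAll (l : List Int) : Bool := l.all (fun x => PySem.Int.mod x 2 == 0)

def pvS : List Int → Int
  | [] => 0
  | x :: xs => pvEP (x :: xs) + pvS xs

theorem pvInner_shift (l : List Int) (t : Int) : pvInner l t = t + pvInner l 0 := by
  induction l generalizing t with
  | nil => simp [pvInner]
  | cons x xs ih =>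
      simp only [pvInner]
      split_ifs with h
      · rw [ih (t + 1), ih (0 + 1)]; ring
      · ring

theorem pvEP_cons (x : Int) (xs : List Int) :
    pvEP (x :: xs) = if PySem.Int.mod x 2 = 0 then 1 + pvEP xs else 0 := by
  unfold pvEP
  simp only [pvInner]
  split_ifs with h
  · rw [pvInner_shift]; ring
  · rfl

theorem pvEP_all (l : List Int) (h : pvAll l = true) : pvEP l = l.length := by
  induction l with
  | nil => simp [pvEP, pvInner]
  | cons x xs ih =>
      simp only [pvAll, List.all_cons, Bool.and_eq_true, beq_iff_eq] at h
      rw [pvEP_cons, if_pos h.1, ih h.2]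
      simp
      ring

theorem pvES_all (l : List Int) (h : pvAll l = true) : pvES l = l.length := by
  unfold pvES
  have hr : pvAll l.reverse = true := by simpa [pvAll, List.all_reverse] using h
  have := pvEP_all l.reverse hr
  simpa [pvEP] using this

theorem pvEP_append (l r : List Int) :
    pvEP (l ++ r) = if pvAll l = true then (l.length : Int) + pvEP r else pvEP l := by
  induction l with
  | nil => simp [pvAll, pvEP]
  | cons x xs ih =>
      simp only [List.cons_append]
      rw [pvEP_cons, pvEP_cons, ih]
      simp only [pvAll, List.all_cons, Bool.and_eq_true, beq_iff_eq]
      by_cases hx : PySem.Int.mod x 2 = 0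
      · by_cases ha : (xs.all (fun x => PySem.Int.mod x 2 == 0)) = true
        · simp only [if_pos hx, if_pos ha, if_pos (And.intro hx ha)]
          simp
          ring
        · have hna : ¬ (PySem.Int.mod x 2 = 0 ∧ (xs.all (fun x => PySem.Int.mod x 2 == 0)) = true) := by tauto
          simp only [if_pos hx, if_neg ha, if_neg hna]
      · have hna : ¬ (PySem.Int.mod x 2 = 0 ∧ (xs.all (fun x => PySem.Int.mod x 2 == 0)) = true) := by tauto
        simp only [if_neg hx, if_neg hna]

theorem pvES_cons (x : Int) (xs : List Int) :
    pvES (x :: xs) =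
      if pvAll xs = true then (xs.length : Int) + (if PySem.Int.mod x 2 = 0 then 1 else 0)
      else pvES xs := by
  unfold pvES
  rw [List.reverse_cons]
  have h := pvEP_append xs.reverse [x]
  have hall : pvAll xs.reverse = pvAll xs := by simp [pvAll, List.all_reverse]
  rw [hall] at h
  simp only [pvEP] at h
  rw [h]
  by_cases ha : pvAll xs = true
  · simp only [if_pos ha, List.length_reverse]
    congr 1
  · simp only [if_neg ha]

theorem pvS_append (l r : List Int) :
    pvS (l ++ r) = pvS l + pvES l * pvEP r + pvS r := by
  induction l with
  | nil => simp [pvS, pvES, pvInner]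
  | cons x xs ih =>
      simp only [List.cons_append, pvS]
      rw [ih, pvES_cons]
      rw [pvEP_cons x (xs ++ r), pvEP_append, pvEP_cons x xs]
      by_cases ha : pvAll xs = true
      · rw [pvES_all xs ha, pvEP_all xs ha]
        simp only [if_pos ha]
        split_ifs with hxe
        · ring
        · ring
      · simp only [if_neg ha]
        split_ifs with hxe
        · ring
        · ring

theorem pvDC_eq_pvS : ∀ (fuel : Nat) (l : List Int), l.length ≤ fuel → pvDC fuel l = pvS l := by
  intro fuel
  induction fuel with
  | zero =>
      intro l hl
      have : l = [] := by
        cases l with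
        | nil => rfl
        | cons a as => simp at hl
      subst this
      simp [pvDC, pvS]
  | succ fuel ih =>
    intro l hl
    match l with
    | [] => simp [pvDC, pvS]
    | [x] =>
        simp only [pvDC]
        simp [pvS, pvEP, pvInner, PySem.List.pyGetD, PySem.List.pyGet?, PySem.List.pyIdx?]
    | x :: y :: l' =>
        simp only [pvDC]
        have h0 : ¬ ((x :: y :: l').length = 0) := by simp
        have h1 : ¬ ((x :: y :: l').length = 1) := by simp
        simp only [if_neg h0, if_neg h1, pv_floordiv_two_cast,
                   PySem.List.slice_to_natCast, PySem.List.slice_from_natCast]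
        set L := x :: y :: l' with hL
        set k := L.length / 2 with hk
        have hL2 : 2 ≤ L.length := by rw [hL]; simp
        have hLf : L.length ≤ fuel + 1 := hl
        have htl : (L.take k).length = k := by simp [List.length_take]; omega
        have hdl : (L.drop k).length = L.length - k := by simp
        rw [ih (L.take k) (by omega), ih (L.drop k) (by omega)]
        have hS := pvS_append (L.take k) (L.drop k)
        rw [List.take_append_drop] at hS
        rw [hS]
        unfold pvES pvEP
        ring

-- A's fold invariant: count = initial + (sum over suffixes) + run * (even prefix)
theorem pvA_inv (l : List Int) (c r : Int) :
    (l.foldl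
      (fun (st : Int × Int) num =>
        if PySem.Int.mod num 2 = 0 then (st.1 + (st.2 + 1), st.2 + 1)
        else (st.1, 0))
      (c, r)).1 = c + pvS l + r * pvEP l := by
  induction l generalizing c r with
  | nil => simp [pvS, pvEP, pvInner]
  | cons x xs ih =>
      simp only [List.foldl_cons]
      by_cases h : PySem.Int.mod x 2 = 0
      · simp only [if_pos h]
        rw [ih]
        simp only [pvS, pvEP_cons, if_pos h]
        ring
      · simp only [if_neg h]
        rw [ih]
        simp only [pvS, pvEP_cons, if_neg h]
        ring

-- ===== VERDICT =====
theorem count_sublists_spec : Claim_equal_count_sublists := by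
  intro numbers _
  unfold Spec_count_sublists count_sublists
  unfold count_sublists_alt
  rw [pvA_inv numbers 0 0, pvDC_eq_pvS numbers.length numbers le_rfl]
  ring
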